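-- pv_equiv track=rewrite | github.com/tomvigrass/kedro | kedro/contrib/io/pyspark/spark_data_set.py | _parse_glob_pattern
-- ===== SOURCE A (Python) =====
-- def _parse_glob_pattern(pattern: str) -> str:
--     special = ("*", "?", "[")
--     clean = []
--     for part in pattern.split("/"):
--         if any(char in part for char in special):
--             break
--         clean.append(part)
--     return "/".join(clean)
-- ===== SOURCE B (Python) =====
-- def _parse_glob_pattern(pattern: str) -> str:
--     # Character-position scan: locate the first glob metacharacter, then walk
--     # backwards to the slash that precedes its path component; no split/join.
--     first = -1
--     for i, ch in enumerate(pattern):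
--         if ch in "*?[":
--             first = i
--             break
--     if first == -1:
--         return pattern
--     for j in range(first - 1, -1, -1):
--         if pattern[j] == "/":
--             return pattern[:j]
--     return ""
-- ===== Notes on version B (the rewrite author's own statement) =====
-- stated objective: alternative
-- what changed: Replaces the split-on-slash loop-with-break plus join by a character-position scan: find the index of the first glob metacharacter, walk backwards to the preceding slash, and return the slice before it (no intermediate part lists, no join).
import Mathlib
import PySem

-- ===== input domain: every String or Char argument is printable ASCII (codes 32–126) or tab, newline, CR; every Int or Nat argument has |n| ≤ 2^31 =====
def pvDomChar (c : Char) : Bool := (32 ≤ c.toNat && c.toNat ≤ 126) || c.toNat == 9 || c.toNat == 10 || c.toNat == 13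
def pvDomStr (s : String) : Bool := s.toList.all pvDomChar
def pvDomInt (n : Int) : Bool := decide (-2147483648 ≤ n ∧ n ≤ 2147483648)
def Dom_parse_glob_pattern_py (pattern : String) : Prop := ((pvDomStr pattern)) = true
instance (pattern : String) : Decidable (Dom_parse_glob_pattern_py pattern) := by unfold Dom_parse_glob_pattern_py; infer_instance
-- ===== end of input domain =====

-- B replaces A's split('/') / loop-with-break / '/'.join by a character-position
-- scan: first glob metacharacter, backward scan to the preceding '/', one slice.


-- ===== PORT A =====
-- 'any(char in part for char in special)', special = ("*", "?", "[")
def specialHit (part : List Char) : Bool :=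
  PySem.Chars.isIn ['*'] part || PySem.Chars.isIn ['?'] part || PySem.Chars.isIn ['['] part

-- the 'for part in pattern.split("/")' loop with its break, accumulating clean
def goClean : List (List Char) → List (List Char)
  | [] => []
  | part :: rest => if specialHit part then [] else part :: goClean rest

def parse_glob_pattern_py (pattern : String) : String :=
  String.ofList (PySem.Chars.join ['/'] (goClean (PySem.Chars.splitOn pattern.toList ['/'])))

-- ===== PORT B =====
-- the backward loop 'for j in range(first - 1, -1, -1): if pattern[j] == "/"':
-- (lastSlashBefore cs n) checks indices n-1, n-2, …, 0 in turn; every index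
-- probed is in range, so getD is exact for pattern[j]
def lastSlashBefore (cs : List Char) : Nat → Option Nat
  | 0 => none
  | j + 1 => if cs.getD j ' ' == '/' then some j else lastSlashBefore cs j

def parse_glob_pattern_py_alt (pattern : String) : String :=
  let cs := pattern.toList
  -- 'for i, ch in enumerate(pattern): if ch in "*?[": first = i; break'
  match cs.findIdx? (fun ch => ch == '*' || ch == '?' || ch == '[') with
  | none => pattern                        -- first == -1
  | some first =>
    match lastSlashBefore cs first with
    | some j => String.ofList (cs.take j)  -- pattern[:j] with 0 ≤ j, exact
    | none => ""

-- ===== PRECONDITION & SPEC =====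
def Spec_parse_glob_pattern_py (pattern : String) (out : String) : Prop := out = parse_glob_pattern_py_alt pattern
instance (pattern : String) (out : String) : Decidable (Spec_parse_glob_pattern_py pattern out) := by unfold Spec_parse_glob_pattern_py; infer_instance

-- ===== CLAIM (what is proved, stated in full; the proofs are below) =====
def Claim_equal_parse_glob_pattern_py : Prop := ∀ (pattern : String), Dom_parse_glob_pattern_py pattern → Spec_parse_glob_pattern_py pattern (parse_glob_pattern_py pattern)

-- ===== LEMMAS AND PROOFS =====

-- proof-only clean recursion for split-on-'/': (head part, remaining parts)
def mySplit1 : List Char → List Char × List (List Char)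
  | [] => ([], [])
  | c :: cs =>
    let r := mySplit1 cs
    if c == '/' then ([], r.1 :: r.2) else (c :: r.1, r.2)

-- the metacharacter test of port B, named
def spb (ch : Char) : Bool := ch == '*' || ch == '?' || ch == '['

-- list-level views of the two ports
def Al (cs : List Char) : List Char :=
  PySem.Chars.join ['/'] (goClean ((mySplit1 cs).1 :: (mySplit1 cs).2))
def Bl (cs : List Char) : List Char :=
  match cs.findIdx? spb with
  | none => cs
  | some first =>
    match lastSlashBefore cs first with
    | some j => cs.take j
    | none => []

theorem splitOn_go_spec (fuel : Nat) (l cur : List Char) (acc : List (List Char))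
    (h : l.length ≤ fuel) :
    PySem.Chars.splitOn.go ['/'] fuel l cur acc =
      acc.reverse ++ ((cur.reverse ++ (mySplit1 l).1) :: (mySplit1 l).2) := by
  induction fuel generalizing l cur acc with
  | zero =>
    have : l = [] := List.length_eq_zero_iff.mp (by omega)
    subst this
    rw [PySem.Chars.splitOn.go]
    simp [mySplit1]
  | succ fuel ih =>
    match l with
    | [] =>
      rw [PySem.Chars.splitOn.go]
      simp [mySplit1]
      omega
    | c :: rest =>
      rw [PySem.Chars.splitOn.go]
      by_cases hc : c = '/'
      · subst hc
        simp only [List.isPrefixOf, BEq.rfl, Bool.and_self, if_pos, List.length_cons,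
          List.drop_succ_cons, List.drop_zero, List.length_singleton, List.length_nil]
        rw [ih rest [] _ (by simpa using Nat.le_of_succ_le_succ h)]
        simp [mySplit1]
      · have hpre : List.isPrefixOf ['/'] (c :: rest) = false := by
          simp [List.isPrefixOf]; exact fun hh => (hc hh.symm).elim
        rw [hpre]
        simp only [Bool.false_eq_true, if_false]
        rw [ih rest (c :: cur) acc (by simpa using Nat.le_of_succ_le_succ h)]
        simp [mySplit1, hc]

theorem splitOn_eq_mySplit (cs : List Char) :
    PySem.Chars.splitOn cs ['/'] = (mySplit1 cs).1 :: (mySplit1 cs).2 := by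
  rw [PySem.Chars.splitOn, splitOn_go_spec _ _ _ _ (by omega)]
  simp

theorem mySplit1_fst (cs : List Char) :
    (mySplit1 cs).1 = cs.takeWhile (fun c => !(c == '/')) := by
  induction cs with
  | nil => rfl
  | cons c cs ih =>
    by_cases hc : c = '/' <;> simp [mySplit1, List.takeWhile_cons, hc, ih]

theorem lastSlashBefore_cons (c : Char) (cs : List Char) (i : Nat) :
    lastSlashBefore (c :: cs) (i + 1) =
      match lastSlashBefore cs i with
      | some j => some (j + 1)
      | none => if c == '/' then some 0 else none := by
  induction i with
  | zero => simp [lastSlashBefore]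
  | succ i ih =>
    conv_lhs => rw [lastSlashBefore]
    conv_rhs => rw [lastSlashBefore]
    by_cases h : cs.getD i ' ' = '/'
    · simp only [List.getD] at h
      simp [List.getD, h]
    · simp only [List.getD] at h
      simp [List.getD, h, ih]

theorem lastSlashBefore_none (cs : List Char) (i : Nat) (h : lastSlashBefore cs i = none) :
    ∀ j, j < i → cs.getD j ' ' ≠ '/' := by
  induction i with
  | zero => intro j hj; omega
  | succ i ih =>
    rw [lastSlashBefore] at h
    by_cases hc : cs.getD i ' ' = '/'
    · simp only [List.getD] at hc
      simp [hc] at h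
    · simp only [List.getD] at hc
      simp [hc] at h
      intro j hj
      rcases Nat.lt_succ_iff_lt_or_eq.mp hj with h1 | h1
      · exact ih h j h1
      · subst h1; exact hc

theorem lastSlashBefore_some (cs : List Char) (i j : Nat) (h : lastSlashBefore cs i = some j) :
    j < i ∧ cs.getD j ' ' = '/' := by
  induction i with
  | zero => simp [lastSlashBefore] at h
  | succ i ih =>
    rw [lastSlashBefore] at h
    by_cases hc : cs.getD i ' ' = '/'
    · simp only [List.getD] at hc
      simp [hc] at h
      subst h
      exact ⟨Nat.lt_succ_self _, by simpa [List.getD] using hc⟩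
    · simp only [List.getD] at hc
      simp [hc] at h
      obtain ⟨h1, h2⟩ := ih h
      exact ⟨Nat.lt_succ_of_lt h1, h2⟩

theorem singleton_infix_iff (a : Char) (l : List Char) : [a] <:+: l ↔ a ∈ l := by
  constructor
  · intro ⟨s, t, h⟩; subst h; simp
  · intro h
    obtain ⟨s, t, h⟩ := List.append_of_mem h
    exact ⟨s, t, by simp [h]⟩

theorem specialHit_iff (p : List Char) :
    specialHit p = true ↔ ∃ x ∈ p, spb x = true := by
  unfold specialHit
  simp only [Bool.or_eq_true, PySem.Chars.isIn_iff_infix, singleton_infix_iff]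
  constructor
  · rintro ((h | h) | h) <;> exact ⟨_, h, by simp [spb]⟩
  · rintro ⟨x, hx, hs⟩
    simp only [spb, Bool.or_eq_true, beq_iff_eq] at hs
    rcases hs with (h | h) | h <;> subst h <;> simp [hx]

theorem specialHit_of_mem (p : List Char) (x : Char) (hx : x ∈ p) (hs : spb x = true) :
    specialHit p = true := (specialHit_iff p).mpr ⟨x, hx, hs⟩

theorem specialHit_false_iff (p : List Char) :
    specialHit p = false ↔ ∀ x ∈ p, spb x = false := by
  rw [← Bool.not_eq_true, specialHit_iff]
  simp

theorem takeWhile_getD (p : Char → Bool) (cs : List Char) (k : Nat)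
    (hk : k < (cs.takeWhile p).length) :
    (cs.takeWhile p).getD k ' ' = cs.getD k ' ' := by
  induction cs generalizing k with
  | nil => simp at hk
  | cons c cs ih =>
    rw [List.takeWhile_cons] at hk ⊢
    by_cases hp : p c
    · simp only [hp, if_pos] at hk ⊢
      cases k with
      | zero => rfl
      | succ k => simpa using ih k (by simpa using hk)
    · simp [hp] at hk

theorem takeWhile_len_le (cs : List Char) (j : Nat) (hj : j < cs.length)
    (h : cs.getD j ' ' = '/') : (cs.takeWhile (fun c => !(c == '/'))).length ≤ j := by
  by_contra hlt
  push_neg at hlt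
  have := takeWhile_getD (fun c => !(c == '/')) cs j hlt
  rw [h] at this
  have hmem : (cs.takeWhile (fun c => !(c == '/'))).getD j ' ' ∈ cs.takeWhile (fun c => !(c == '/')) := by
    rw [List.getD_eq_getElem _ _ hlt]
    exact List.getElem_mem hlt
  have := List.mem_takeWhile_imp (by rw [this] at hmem; exact hmem)
  simp at this

theorem mem_takeWhile_of (cs : List Char) (i : Nat) (hi : i < cs.length)
    (hall : ∀ k, k < i → cs.getD k ' ' ≠ '/') (hne : cs.getD i ' ' ≠ '/') :
    cs.getD i ' ' ∈ cs.takeWhile (fun c => !(c == '/')) := by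
  induction cs generalizing i with
  | nil => simp at hi
  | cons c cs ih =>
    cases i with
    | zero =>
      simp only [List.getD_cons_zero] at hne ⊢
      simp [List.takeWhile_cons, hne]
    | succ i =>
      have hc : c ≠ '/' := by simpa using hall 0 (Nat.succ_pos _)
      simp only [List.getD_cons_succ] at hne ⊢
      rw [List.takeWhile_cons]
      simp only [hc, bne_iff_ne, ne_eq, not_false_iff, beq_iff_eq, if_pos, Bool.not_eq_eq_eq_not]
      have := ih i (by simpa using hi) (fun k hk => by simpa using hall (k+1) (by omega)) hne
      simp [hc]
      right
      simpa [List.getD] using this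

theorem spb_ne_slash (c : Char) (h : spb c = true) : c ≠ '/' := by
  simp only [spb, Bool.or_eq_true, beq_iff_eq] at h
  rcases h with (h | h) | h <;> subst h <;> decide

theorem specialHit_nil : specialHit [] = false := by decide

theorem specialHit_cons (c : Char) (p : List Char) :
    specialHit (c :: p) = (spb c || specialHit p) := by
  rw [Bool.eq_iff_iff]
  simp only [Bool.or_eq_true, specialHit_iff, List.mem_cons]
  constructor
  · rintro ⟨x, (rfl | hx), hs⟩
    · exact Or.inl hs
    · exact Or.inr ⟨x, hx, hs⟩
  · rintro (h | ⟨x, hx, hs⟩)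
    · exact ⟨c, Or.inl rfl, h⟩
    · exact ⟨x, Or.inr hx, hs⟩

theorem join_cons_eq (c : Char) (p : List Char) (L : List (List Char)) :
    PySem.Chars.join ['/'] ((c :: p) :: L) = c :: PySem.Chars.join ['/'] (p :: L) := by
  cases L with
  | nil => rw [PySem.Chars.join_singleton, PySem.Chars.join_singleton]
  | cons q t => rw [PySem.Chars.join_cons_cons, PySem.Chars.join_cons_cons]; simp

theorem Al_of_dirty (cs : List Char) (h : specialHit (mySplit1 cs).1 = true) :
    Al cs = [] := by
  unfold Al goClean
  rw [if_pos h, PySem.Chars.join_nil]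

theorem Al_cons_special (c : Char) (cs : List Char) (h : spb c = true) :
    Al (c :: cs) = [] := by
  apply Al_of_dirty
  have hc : ¬ (c == '/') = true := by simpa using spb_ne_slash c h
  have : (mySplit1 (c :: cs)).1 = c :: (mySplit1 cs).1 := by
    simp [mySplit1, hc]
  rw [this]
  exact specialHit_of_mem _ c (List.mem_cons_self) h

theorem Al_cons_slash (cs : List Char) :
    Al ('/' :: cs) = if specialHit (mySplit1 cs).1 then [] else '/' :: Al cs := by
  have h1 : mySplit1 ('/' :: cs) = ([], (mySplit1 cs).1 :: (mySplit1 cs).2) := by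
    simp [mySplit1]
  by_cases h : specialHit (mySplit1 cs).1
  · rw [if_pos h]
    unfold Al
    rw [h1]
    simp only [goClean, specialHit_nil, Bool.false_eq_true, if_false, if_pos h]
    rw [PySem.Chars.join_singleton]
  · rw [if_neg h]
    unfold Al
    rw [h1]
    simp only [goClean, specialHit_nil, Bool.false_eq_true, if_false, if_neg h]
    rw [PySem.Chars.join_cons_cons]
    simp

theorem Al_cons_plain (c : Char) (cs : List Char) (h1 : spb c = false) (h2 : ¬ c = '/') :
    Al (c :: cs) = if specialHit (mySplit1 cs).1 then [] else c :: Al cs := by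
  have hms : mySplit1 (c :: cs) = (c :: (mySplit1 cs).1, (mySplit1 cs).2) := by
    simp [mySplit1, h2]
  by_cases h : specialHit (mySplit1 cs).1
  · rw [if_pos h]
    apply Al_of_dirty
    rw [hms, specialHit_cons, h]
    simp
  · rw [if_neg h]
    unfold Al
    rw [hms]
    simp only [goClean, specialHit_cons, h1, Bool.false_or, h, Bool.false_eq_true, if_false]
    exact join_cons_eq c _ _

theorem headClean_noSpecial (cs : List Char) (h : cs.findIdx? spb = none) :
    specialHit (mySplit1 cs).1 = false := by
  rw [mySplit1_fst, specialHit_false_iff]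
  intro x hx
  exact List.findIdx?_eq_none_iff.mp h x (List.takeWhile_subset _ hx)

theorem headClean_slash (cs : List Char) (i j : Nat) (hi : cs.findIdx? spb = some i)
    (hj : lastSlashBefore cs i = some j) : specialHit (mySplit1 cs).1 = false := by
  obtain ⟨hji, hslash⟩ := lastSlashBefore_some cs i j hj
  obtain ⟨hilen, hspi, hmin⟩ := List.findIdx?_eq_some_iff_getElem.mp hi
  have hjlen : j < cs.length := lt_trans hji hilen
  rw [mySplit1_fst, specialHit_false_iff]
  intro x hx
  obtain ⟨k, hk, hkx⟩ := List.mem_iff_getElem.mp hx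
  have hklen : k < j := lt_of_lt_of_le hk (takeWhile_len_le cs j hjlen hslash)
  have hxk : x = cs.getD k ' ' := by
    rw [← takeWhile_getD _ cs k hk, List.getD_eq_getElem _ _ hk, hkx]
  by_contra hsp
  simp only [Bool.not_eq_false] at hsp
  have : ¬ spb cs[k] = true := hmin k (by omega)
  apply this
  rw [← List.getD_eq_getElem cs ' ' (by omega), ← hxk]
  exact hsp

theorem headDirty_noSlash (cs : List Char) (i : Nat) (hi : cs.findIdx? spb = some i)
    (hj : lastSlashBefore cs i = none) : specialHit (mySplit1 cs).1 = true := by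
  obtain ⟨hilen, hspi, hmin⟩ := List.findIdx?_eq_some_iff_getElem.mp hi
  have hne : cs.getD i ' ' ≠ '/' := by
    rw [List.getD_eq_getElem _ _ hilen]
    exact spb_ne_slash _ hspi
  have hmem := mem_takeWhile_of cs i hilen (lastSlashBefore_none cs i hj) hne
  rw [mySplit1_fst]
  apply specialHit_of_mem _ _ hmem
  rw [List.getD_eq_getElem _ _ hilen]
  exact hspi

theorem Al_noSpecial (cs : List Char) (h : cs.findIdx? spb = none) : Al cs = cs := by
  induction cs with
  | nil => decide
  | cons c cs ih =>
    have hall := List.findIdx?_eq_none_iff.mp h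
    have hc : spb c = false := hall c (List.mem_cons_self)
    have htail : cs.findIdx? spb = none :=
      List.findIdx?_eq_none_iff.mpr (fun x hx => hall x (List.mem_cons_of_mem _ hx))
    have hclean := headClean_noSpecial cs htail
    by_cases hsl : c = '/'
    · subst hsl
      rw [Al_cons_slash, if_neg (by simp [hclean]), ih htail]
    · rw [Al_cons_plain c cs hc hsl, if_neg (by simp [hclean]), ih htail]

theorem main_lemma (cs : List Char) : Al cs = Bl cs := by
  induction cs with
  | nil => decide
  | cons c cs ih =>
    by_cases hsp : spb c
    · rw [Al_cons_special c cs hsp]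
      unfold Bl
      rw [List.findIdx?_cons, if_pos hsp]
      rfl
    · cases hfi : cs.findIdx? spb with
      | none =>
        have : (c :: cs).findIdx? spb = none := by
          rw [List.findIdx?_cons, if_neg (by simp [hsp]), hfi]; rfl
        rw [Al_noSpecial _ this]
        simp only [Bl, this]
      | some i =>
        have hfc : (c :: cs).findIdx? spb = some (i + 1) := by
          rw [List.findIdx?_cons, if_neg (by simp [hsp]), hfi]; rfl
        cases hls : lastSlashBefore cs i with
        | none =>
          have hdirty := headDirty_noSlash cs i hfi hls
          have hlc : lastSlashBefore (c :: cs) (i + 1) =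
              if c == '/' then some 0 else none := by
            rw [lastSlashBefore_cons, hls]
          by_cases hsl : c = '/'
          · subst hsl
            rw [Al_cons_slash, if_pos hdirty]
            simp only [Bl, hfc, hlc]
            simp
          · rw [Al_cons_plain c cs (by simpa using hsp) hsl, if_pos hdirty]
            simp only [Bl, hfc, hlc]
            simp [hsl]
        | some j =>
          have hclean := headClean_slash cs i j hfi hls
          have hlc : lastSlashBefore (c :: cs) (i + 1) = some (j + 1) := by
            rw [lastSlashBefore_cons, hls]
          have hbl : Bl cs = cs.take j := by simp only [Bl, hfi, hls]
          by_cases hsl : c = '/'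
          · subst hsl
            rw [Al_cons_slash, if_neg (by simp [hclean]), ih, hbl]
            simp only [Bl, hfc, hlc]
            rfl
          · rw [Al_cons_plain c cs (by simpa using hsp) hsl,
              if_neg (by simp [hclean]), ih, hbl]
            simp only [Bl, hfc, hlc]
            rfl

-- ===== VERDICT (by name: the statement is the Claim_ definition above) =====
theorem parse_glob_pattern_py_spec : Claim_equal_parse_glob_pattern_py := by
  intro pattern _
  unfold Spec_parse_glob_pattern_py parse_glob_pattern_py parse_glob_pattern_py_alt
  have hA : PySem.Chars.join ['/'] (goClean (PySem.Chars.splitOn pattern.toList ['/'])) =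
      Bl pattern.toList := by
    rw [splitOn_eq_mySplit]
    exact main_lemma pattern.toList
  rw [hA]
  have hpred : (fun ch => ch == '*' || ch == '?' || ch == '[') = spb := rfl
  simp only [hpred]
  cases hfi : pattern.toList.findIdx? spb with
  | none => simp only [Bl, hfi, String.ofList_toList]
  | some i =>
    cases hls : lastSlashBefore pattern.toList i with
    | none => simp only [Bl, hfi, hls]
    | some j => simp only [Bl, hfi, hls]
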